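-- pv_equiv track=rewrite | github.com/Jang-Donghyeok/Baekjoon | 연습.py | pivoting
-- ===== SOURCE A (Python) =====
-- def pivoting(mat):
--     row_idx = list(range(len(mat)))
--     col_idx = len(mat[0])
--     pivot_mat = []
--     for c in range(col_idx):
--         rows_with_nonzero = [r for r in row_idx if mat[r][c] != 0]
--         if rows_with_nonzero:
--             pivot = rows_with_nonzero[0]
--             for idx in rows_with_nonzero:
--                 pivot_mat.append(mat[idx])
--                 row_idx.remove(idx)
--     return pivot_mat
-- ===== SOURCE B (Python) =====
-- def pivoting(mat):
--     cols = len(mat[0])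
--     buckets = [[] for _ in range(cols)]
--     for row in mat:
--         for c, v in enumerate(row[:cols]):
--             if v != 0:
--                 buckets[c].append(row)
--                 break
--     return [row for bucket in buckets for row in bucket]
-- ===== Notes on version B (the rewrite author's own statement) =====
-- stated objective: alternative
-- what changed: A rescans the remaining row indices for every column and deletes each selected index with list.remove; B makes one pass over the rows, bucketing each row under its first nonzero column, and concatenates the buckets in column order.
import Mathlib
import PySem

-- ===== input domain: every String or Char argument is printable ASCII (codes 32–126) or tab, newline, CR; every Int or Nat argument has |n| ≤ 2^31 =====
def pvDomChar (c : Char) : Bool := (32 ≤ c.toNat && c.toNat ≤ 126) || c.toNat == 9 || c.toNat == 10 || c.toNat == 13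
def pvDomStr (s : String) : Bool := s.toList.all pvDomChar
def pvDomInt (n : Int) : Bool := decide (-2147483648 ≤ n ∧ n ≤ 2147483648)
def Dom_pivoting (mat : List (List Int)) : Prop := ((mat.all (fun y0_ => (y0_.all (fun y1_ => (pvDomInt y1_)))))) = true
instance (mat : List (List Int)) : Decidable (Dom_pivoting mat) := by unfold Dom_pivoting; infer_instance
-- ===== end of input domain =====

-- B replaces A's per-column rescans of the remaining rows (with list.remove calls)
-- by a single pass that buckets each row under its first nonzero column; objective: alternative.

-- ===== PORT A =====
-- mat[r] / mat[r][c] are ported with pyGetD (the default is never used on admitted inputs: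
-- indices come from range(len(mat)) resp. range(len(mat[0])) and Pre_ excludes the rows
-- Python would IndexError on).  pvStepA is the body of A's 'for c in range(col_idx)' loop.
def pvStepA (mat : List (List Int)) (st : List (List Int) × List Int) (c : Int) :
    List (List Int) × List Int :=
  let rowsWithNonzero := st.2.filter
    (fun r => PySem.List.pyGetD (PySem.List.pyGetD mat r ([] : List Int)) c 0 != 0)
  if rowsWithNonzero ≠ [] then
    rowsWithNonzero.foldl
      (fun (st2 : List (List Int) × List Int) idx =>
        (st2.1 ++ [PySem.List.pyGetD mat idx ([] : List Int)],
         (PySem.List.remove? st2.2 idx).getD st2.2))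
      st
  else st

def pivoting (mat : List (List Int)) : List (List Int) :=
  let rowIdx := PySem.List.pyRange 0 (mat.length : Int) 1
  let colIdx := (PySem.List.pyGetD mat 0 ([] : List Int)).length
  ((PySem.List.pyRange 0 (colIdx : Int) 1).foldl (pvStepA mat) ([], rowIdx)).1

-- ===== PORT B =====
-- inner 'for c, v in enumerate(row[:cols]): if v != 0: buckets[c].append(row); break'
def pvPlace (row : List Int) (buckets : List (List (List Int))) :
    List (Int × Int) → List (List (List Int))
  | [] => buckets
  | (c, v) :: rest =>
      if v != 0 then buckets.set c.toNat (buckets.getD c.toNat [] ++ [row])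
      else pvPlace row buckets rest

def pivoting_alt (mat : List (List Int)) : List (List Int) :=
  let cols := (PySem.List.pyGetD mat 0 ([] : List Int)).length
  let buckets : List (List (List Int)) :=
    (PySem.List.pyRange 0 (cols : Int) 1).map (fun _ => [])
  let buckets := mat.foldl
    (fun bks row =>
      pvPlace row bks (PySem.List.enumerate (PySem.List.slice row none (some (cols : Int))) 0))
    buckets
  buckets.flatten

-- ===== PRECONDITION & SPEC =====
-- Pre_ excludes exactly the inputs where Python A raises IndexError: the empty matrix
-- (mat[0]), and any all-zero row shorter than the first row (mat[r][c] runs past its end).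
def Pre_pivoting (mat : List (List Int)) : Prop :=
  mat ≠ [] ∧ ∀ row ∈ mat, mat.headI.length ≤ row.length ∨ ∃ v ∈ row, v ≠ 0
instance (mat : List (List Int)) : Decidable (Pre_pivoting mat) := by unfold Pre_pivoting; infer_instance
def pvWitness_pivoting : List (List Int) := [[0, 1], [1, 0], [0, 0]]

def Spec_pivoting (mat : List (List Int)) (out : List (List Int)) : Prop := out = pivoting_alt mat
instance (mat : List (List Int)) (out : List (List Int)) : Decidable (Spec_pivoting mat out) := by unfold Spec_pivoting; infer_instance

-- ===== CLAIM (what is proved, stated in full; the proofs are below) =====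
def Claim_equal_pivoting : Prop := ∀ (mat : List (List Int)), Dom_pivoting mat → Pre_pivoting mat → Spec_pivoting mat (pivoting mat)
-- ===== LEMMAS AND PROOFS =====

-- the common middle form: rows grouped, in order, by their first nonzero column among the
-- first C columns (C = len(mat[0])); rows with no such column are dropped
def pvKey (C : Nat) (row : List Int) : Option Nat := (row.take C).findIdx? (fun v => v != 0)

def pvGroups (mat : List (List Int)) (C : Nat) : List (List Int) :=
  ((List.range C).map (fun c => mat.filter (fun row => pvKey C row == some c))).flatten

-- zero prefix of length c (getD-style: positions past the row's end count as zero)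
def pvZp (c : Nat) (row : List Int) : Bool := (row.take c).all (fun v => v == 0)

theorem pvRemove_middle (pre t : List Int) (a : Int) (h : a ∉ pre) :
    PySem.List.remove? (pre ++ a :: t) a = some (pre ++ t) := by
  induction pre with
  | nil => simp
  | cons x xs ih =>
      have hx : x ≠ a := by intro e; exact h (by simp [e])
      rw [List.cons_append, PySem.List.remove?_cons_of_ne _ hx,
        ih (by intro m; exact h (by simp [m]))]
      rfl

-- inner loop of A: append the selected rows to pivot_mat, delete them from row_idx
theorem pvInner (g : Int → List Int) (p : Int → Bool) :
    ∀ (l pre : List Int) (pm : List (List Int)), (pre ++ l).Nodup →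
    (l.filter p).foldl
        (fun st2 idx => (st2.1 ++ [g idx], (PySem.List.remove? st2.2 idx).getD st2.2))
        (pm, pre ++ l)
      = (pm ++ (l.filter p).map g, pre ++ l.filter (fun r => !(p r))) := by
  intro l
  induction l with
  | nil => intro pre pm _; simp
  | cons a t ih =>
      intro pre pm hnd
      have ha : a ∉ pre := by
        intro m
        have h2 : (pre ++ a :: t).Nodup := hnd
        rw [List.nodup_append] at h2
        exact h2.2.2 a m a (List.mem_cons_self ..) rfl
      by_cases hp : p a = true
      · rw [List.filter_cons_of_pos hp, List.filter_cons_of_neg (by simp [hp])]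
        simp only [List.foldl_cons, pvRemove_middle pre t a ha, Option.getD_some]
        have hnd' : (pre ++ t).Nodup :=
          hnd.sublist (List.Sublist.append (List.Sublist.refl pre) (List.sublist_cons_self a t))
        rw [ih pre (pm ++ [g a]) hnd']
        simp
      · have hpa : p a = false := by simpa using hp
        rw [List.filter_cons_of_neg hp, List.filter_cons_of_pos (by simp [hpa])]
        have hnd' : ((pre ++ [a]) ++ t).Nodup := by simpa using hnd
        have h3 := ih (pre ++ [a]) pm hnd'
        simp only [List.append_assoc, List.singleton_append] at h3
        rw [h3]

theorem pvKey_lt {C : Nat} {row : List Int} {j : Nat} (h : pvKey C row = some j) : j < C := by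
  unfold pvKey at h
  rw [List.findIdx?_eq_some_iff_getElem] at h
  obtain ⟨hj, -⟩ := h
  have := List.length_take_le C row
  omega

theorem pvZp_getElem (c : Nat) (row : List Int) :
    pvZp c row = true ↔ (∀ j, j < c → (hl : j < row.length) → row[j] = 0) := by
  unfold pvZp
  rw [List.all_eq_true]
  constructor
  · intro h j hjc hjl
    have hm : row[j] ∈ row.take c := by
      have := List.getElem_take (xs := row) (j := c) (i := j)
        (h := by simp [List.length_take]; omega)
      exact this ▸ List.getElem_mem _
    simpa using h _ hm
  · intro h v hv
    obtain ⟨i, hi, rfl⟩ := List.getElem_of_mem hv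
    rw [List.getElem_take]
    simp only [List.length_take] at hi
    simpa using h i (by omega) (by omega)

theorem pvZp_succ (c : Nat) (row : List Int) :
    pvZp (c + 1) row = (pvZp c row && (PySem.List.pyGetD row (c : Int) 0 == 0)) := by
  unfold pvZp
  by_cases h : c < row.length
  · rw [PySem.List.pyGetD_natCast, List.take_add_one, List.getElem?_eq_getElem h,
      List.all_append]
    simp [List.getD_eq_getElem?_getD, List.getElem?_eq_getElem h]
  · rw [List.take_of_length_le (by omega), List.take_of_length_le (by omega)]
    have h2 : row[c]? = none := List.getElem?_eq_none_iff.mpr (by omega)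
    simp [PySem.List.pyGetD_natCast, List.getD_eq_getElem?_getD, h2]

theorem pvKey_iff (C c : Nat) (hc : c < C) (row : List Int) :
    (pvKey C row == some c) = (pvZp c row && ((PySem.List.pyGetD row (c : Int) 0) != 0)) := by
  rw [Bool.eq_iff_iff]
  simp only [beq_iff_eq, Bool.and_eq_true, bne_iff_ne, ne_eq, PySem.List.pyGetD_natCast]
  unfold pvKey
  rw [List.findIdx?_eq_some_iff_getElem]
  constructor
  · rintro ⟨h, hp, hprev⟩
    have hlen : c < row.length := by simp [List.length_take] at h; omega
    refine ⟨(pvZp_getElem c row).mpr ?_, ?_⟩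
    · intro j hjc hjl
      have := hprev j hjc
      rw [List.getElem_take] at this
      simpa using this
    · rw [List.getElem_take] at hp
      rw [List.getD_eq_getElem?_getD, List.getElem?_eq_getElem hlen]
      simpa using hp
  · rintro ⟨hz, hnz⟩
    have hlen : c < row.length := by
      by_contra hl
      rw [List.getD_eq_getElem?_getD, List.getElem?_eq_none_iff.mpr (by omega)] at hnz
      exact hnz rfl
    rw [List.getD_eq_getElem?_getD, List.getElem?_eq_getElem hlen] at hnz
    refine ⟨by simp [List.length_take]; omega, ?_, ?_⟩
    · rw [List.getElem_take]; simpa using hnz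
    · intro j hjc
      rw [List.getElem_take]
      simpa using (pvZp_getElem c row).mp hz j hjc (by omega)

-- ===== A-side =====

theorem pvStepA_eq (mat : List (List Int)) (c : Nat) (pm : List (List Int)) (rem : List Int)
    (hnd : rem.Nodup) :
    pvStepA mat (pm, rem) (c : Int)
      = (pm ++ (rem.filter
            (fun r => PySem.List.pyGetD (PySem.List.pyGetD mat r ([] : List Int)) (c : Int) 0 != 0)).map
            (fun r => PySem.List.pyGetD mat r ([] : List Int)),
         rem.filter
            (fun r => !(PySem.List.pyGetD (PySem.List.pyGetD mat r ([] : List Int)) (c : Int) 0 != 0))) := by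
  unfold pvStepA
  simp only []
  by_cases hS : rem.filter
      (fun r => PySem.List.pyGetD (PySem.List.pyGetD mat r ([] : List Int)) (c : Int) 0 != 0) ≠ []
  · rw [if_pos hS]
    have := pvInner (fun r => PySem.List.pyGetD mat r ([] : List Int))
      (fun r => PySem.List.pyGetD (PySem.List.pyGetD mat r ([] : List Int)) (c : Int) 0 != 0)
      rem [] pm (by simpa using hnd)
    simpa using this
  · rw [if_neg hS]
    simp only [ne_eq, not_not] at hS
    rw [hS]
    have hall := List.filter_eq_nil_iff.mp hS
    have h2 : rem.filter
        (fun r => !(PySem.List.pyGetD (PySem.List.pyGetD mat r ([] : List Int)) (c : Int) 0 != 0)) = rem :=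
      List.filter_eq_self.mpr (fun a ha => by simpa using hall a ha)
    rw [h2]
    simp

theorem pvIdxMap (mat : List (List Int)) (q : List Int → Bool) :
    ((PySem.List.pyRange 0 (mat.length : Int) 1).filter
        (fun r => q (PySem.List.pyGetD mat r ([] : List Int)))).map
      (fun r => PySem.List.pyGetD mat r ([] : List Int))
    = mat.filter q := by
  rw [show (fun r => q (PySem.List.pyGetD mat r ([] : List Int)))
        = (q ∘ fun j => PySem.List.pyGetD mat j ([] : List Int)) from rfl,
      ← List.filter_map, PySem.List.map_pyGetD_pyRange_zero']

theorem pvA_invariant (mat : List (List Int)) (C : Nat) :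
    ∀ c, c ≤ C →
    (((List.range c).map (fun (j : Nat) => (j : Int))).foldl (pvStepA mat)
        ([], PySem.List.pyRange 0 (mat.length : Int) 1))
    = ( ((List.range c).map (fun j => mat.filter (fun row => pvKey C row == some j))).flatten,
        (PySem.List.pyRange 0 (mat.length : Int) 1).filter
          (fun r => pvZp c (PySem.List.pyGetD mat r ([] : List Int))) ) := by
  intro c
  induction c with
  | zero =>
      intro _
      simp [pvZp]
  | succ c ih =>
      intro hc
      rw [List.range_succ, List.map_append, List.foldl_append, ih (by omega)]
      simp only [List.map_cons, List.map_nil, List.foldl_cons, List.foldl_nil]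
      rw [pvStepA_eq mat c _ _ ((PySem.List.nodup_pyRange_one 0 _).filter _)]
      refine Prod.ext ?_ ?_
      · simp only [List.map_append, List.map_cons, List.map_nil, List.flatten_append,
          List.flatten_cons, List.flatten_nil, List.append_nil]
        congr 1
        rw [List.filter_filter, pvIdxMap mat
          (fun row => (PySem.List.pyGetD row (c : Int) 0 != 0) && pvZp c row)]
        exact List.filter_congr (fun row _ => by
          rw [pvKey_iff C c (by omega), Bool.and_comm])
      · simp only []
        rw [List.filter_filter]
        exact List.filter_congr (fun r _ => by
          rw [pvZp_succ, Bool.and_comm]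
          congr 1
          simp [bne])

theorem pvA_eq_groups (mat : List (List Int)) :
    pivoting mat = pvGroups mat (PySem.List.pyGetD mat 0 ([] : List Int)).length := by
  unfold pivoting
  simp only []
  have h0 : PySem.List.pyRange 0 ((PySem.List.pyGetD mat 0 ([] : List Int)).length : Int) 1
      = (List.range (PySem.List.pyGetD mat 0 ([] : List Int)).length).map (fun (j : Nat) => (j : Int)) := by
    rw [PySem.List.pyRange_one]
    simp
  rw [h0, pvA_invariant mat (PySem.List.pyGetD mat 0 ([] : List Int)).length _ le_rfl]
  rfl

-- ===== B-side =====

theorem pvPlace_spec (row : List Int) :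
    ∀ (l : List Int) (s : Nat) (bks : List (List (List Int))),
    pvPlace row bks (PySem.List.enumerate l (s : Int))
      = match l.findIdx? (fun v => v != 0) with
        | none => bks
        | some k => bks.set (s + k) (bks.getD (s + k) [] ++ [row]) := by
  intro l
  induction l with
  | nil => intro s bks; simp [pvPlace, PySem.List.enumerate]
  | cons x xs ih =>
      intro s bks
      rw [PySem.List.enumerate_cons, List.findIdx?_cons]
      by_cases hx : (x != 0) = true
      · simp [pvPlace, hx]
      · have hx' : (x != 0) = false := by simpa using hx
        have hcast : ((s : Int) + 1) = ((s + 1 : Nat) : Int) := by push_cast; ring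
        rw [show pvPlace row bks ((((s : Int), x)) :: PySem.List.enumerate xs ((s : Int) + 1))
              = pvPlace row bks (PySem.List.enumerate xs ((s : Int) + 1)) from by
            simp [pvPlace, hx'], hcast, ih (s + 1) bks, hx']
        rcases h : xs.findIdx? (fun v => v != 0) with _ | k
        · simp
        · simp only [Bool.false_eq_true, if_false, Option.map_some]
          have he : s + 1 + k = s + (k + 1) := by omega
          rw [he]

theorem pvPlace_spec0 (row l : List Int) (bks : List (List (List Int))) :
    pvPlace row bks (PySem.List.enumerate l 0)
      = match l.findIdx? (fun v => v != 0) with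
        | none => bks
        | some k => bks.set k (bks.getD k [] ++ [row]) := by
  have h := pvPlace_spec row l 0 bks
  simpa using h

theorem pvB_fold (C : Nat) :
    ∀ (rows : List (List Int)) (bks : List (List (List Int))), bks.length = C →
    ((rows.foldl (fun bks row =>
        pvPlace row bks (PySem.List.enumerate (PySem.List.slice row none (some (C : Int))) 0))
        bks).length = C
     ∧ ∀ k, k < C →
        (rows.foldl (fun bks row =>
          pvPlace row bks (PySem.List.enumerate (PySem.List.slice row none (some (C : Int))) 0))
          bks).getD k []
        = bks.getD k [] ++ rows.filter (fun row => pvKey C row == some k)) := by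
  intro rows
  induction rows with
  | nil => intro bks h; exact ⟨h, fun k _ => by simp⟩
  | cons row rest ih =>
      intro bks hlen
      rw [List.foldl_cons, PySem.List.slice_to_natCast, pvPlace_spec0]
      rcases hk : (row.take C).findIdx? (fun v => v != 0) with _ | j
      · simp only []
        obtain ⟨h1, h2⟩ := ih bks hlen
        refine ⟨h1, fun k hkC => ?_⟩
        rw [h2 k hkC, List.filter_cons_of_neg (by simp [pvKey, hk])]
      · simp only []
        have hj : j < C := pvKey_lt (C := C) (row := row) hk
        have hlen' : (bks.set j (bks.getD j [] ++ [row])).length = C := by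
          simpa using hlen
        obtain ⟨h1, h2⟩ := ih (bks.set j (bks.getD j [] ++ [row])) hlen'
        refine ⟨h1, fun k hkC => ?_⟩
        rw [h2 k hkC]
        by_cases hkj : k = j
        · subst hkj
          rw [List.filter_cons_of_pos (by simp [pvKey, hk])]
          rw [List.getD_eq_getElem?_getD, List.getElem?_set_self (by omega), Option.getD_some]
          simp [List.append_assoc]
        · rw [List.filter_cons_of_neg (by simp [pvKey, hk, Ne.symm hkj])]
          rw [List.getD_eq_getElem?_getD, List.getElem?_set_ne (by omega),
            ← List.getD_eq_getElem?_getD]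

theorem pvB_eq_groups (mat : List (List Int)) :
    pivoting_alt mat = pvGroups mat (PySem.List.pyGetD mat 0 ([] : List Int)).length := by
  unfold pivoting_alt
  simp only []
  set C := (PySem.List.pyGetD mat 0 ([] : List Int)).length with hC
  have hinitlen : ((PySem.List.pyRange 0 (C : Int) 1).map
      (fun _ => ([] : List (List Int)))).length = C := by
    rw [PySem.List.pyRange_one]
    simp
  obtain ⟨hL, hget⟩ := pvB_fold C mat _ hinitlen
  have hmain : mat.foldl (fun bks row =>
        pvPlace row bks (PySem.List.enumerate (PySem.List.slice row none (some (C : Int))) 0))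
        ((PySem.List.pyRange 0 (C : Int) 1).map (fun _ => []))
      = (List.range C).map (fun k => mat.filter (fun row => pvKey C row == some k)) := by
    apply List.ext_getElem
    · rw [hL]; simp
    · intro k h1 h2
      rw [← List.getD_eq_getElem _ [] h1, hget k (by rw [hL] at h1; exact h1)]
      have hinit : ((PySem.List.pyRange 0 (C : Int) 1).map
          (fun _ => ([] : List (List Int)))).getD k [] = [] := by
        simp [List.getD_eq_getElem?_getD]
      rw [hinit, List.nil_append, List.getElem_map, List.getElem_range]
  rw [hmain]
  rfl

-- ===== VERDICT (by name: the statement is the Claim_ definition above) =====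
theorem pivoting_spec : Claim_equal_pivoting := by
  intro mat _ _
  unfold Spec_pivoting
  rw [pvA_eq_groups, pvB_eq_groups]
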